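-- pv_equiv track=rewrite | github.com/MrBrantCode/unitest_baseline | mut_generate/mist_train_taco/taco_10300/solution.py | calculate_minimum_distance_sum
-- ===== SOURCE A (Python) =====
-- def calculate_minimum_distance_sum(n, x, v):
--     """
--     Calculate the sum of the minimum distances over all pairs of points.
--
--     Parameters:
--     n (int): The number of points.
--     x (list of int): The list of initial coordinates of the points.
--     v (list of int): The list of speeds of the points.
--
--     Returns:
--     int: The sum of the minimum distances over all pairs of points.
--     """
--     from bisect import bisect_left
--
--     # Pair the speeds and coordinates, then sort by speed
--     z = sorted(list(zip(v, x)))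
--
--     # Sort the coordinates
--     x.sort()
--
--     # Initialize the sum
--     s = 0
--
--     # Calculate the sum of minimum distances
--     for i in range(n):
--         s += (bisect_left(x, z[i][1]) + i - n + 1) * z[i][1]
--
--     return s
-- ===== SOURCE B (Python) =====
-- def calculate_minimum_distance_sum(n, x, v):
--     """
--     Same value as the bisect solution, by swapping the summation order:
--     instead of a binary-search rank per chosen point, sort the n chosen
--     coordinates and do ONE two-pointer merge sweep over the coordinates in
--     descending order, maintaining a running suffix sum of the chosen
--     coordinates strictly greater than the current one.
--     Sorts x in place, exactly like the original.
--     """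
--     z = sorted(zip(v, x))
--     x.sort()
--     total = 0
--     w = []
--     for i in range(n):
--         c = z[i][1]
--         total += (i - n + 1) * c
--         w.append(c)
--     w.sort()
--     j = len(w)
--     suff = 0
--     for b in reversed(x):
--         while j > 0 and w[j - 1] > b:
--             j -= 1
--             suff += w[j]
--         total += suff
--     return total
-- ===== Notes on version B (the rewrite author's own statement) =====
-- stated objective: alternative
-- what changed: Replaces A's per-chosen-point bisect_left binary searches by a summation-order swap: B sorts the n chosen coordinates once and then makes a single descending two-pointer merge sweep over the sorted coordinate list, maintaining a running suffix sum of the chosen coordinates strictly greater than the current coordinate; no rank formula or binary search per point remains.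
import Mathlib
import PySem

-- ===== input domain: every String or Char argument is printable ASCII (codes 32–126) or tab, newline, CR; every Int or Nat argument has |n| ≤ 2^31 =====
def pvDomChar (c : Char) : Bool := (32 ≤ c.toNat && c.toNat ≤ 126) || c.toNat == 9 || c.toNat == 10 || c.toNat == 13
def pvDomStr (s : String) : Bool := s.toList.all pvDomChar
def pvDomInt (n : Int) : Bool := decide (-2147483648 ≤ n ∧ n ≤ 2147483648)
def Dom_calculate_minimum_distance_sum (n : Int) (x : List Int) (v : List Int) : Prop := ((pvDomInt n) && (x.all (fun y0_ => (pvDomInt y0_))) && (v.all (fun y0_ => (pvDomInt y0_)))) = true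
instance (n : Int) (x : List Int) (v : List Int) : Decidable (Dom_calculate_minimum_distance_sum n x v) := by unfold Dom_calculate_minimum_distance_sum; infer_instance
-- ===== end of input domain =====

-- B swaps the summation order: instead of A's per-chosen-point bisect_left binary search into
-- the sorted coordinates, B sorts the chosen coordinates and makes ONE descending two-pointer
-- merge sweep over the sorted coordinate list with a running suffix sum (alternative algorithm,
-- similar cost); like A, B sorts x in place, so the side effect matches too.

-- ===== PORT A =====
-- z = sorted(list(zip(v, x))): Python sorts the pairs lexicographically.  z[i] is ported with
-- pyGetD (exact under Pre_, where i < n ≤ len(z)); x.sort() is ported as a sorted copy (the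
-- claim is about return values; both Pythons perform the same in-place sort of x).
def calculate_minimum_distance_sum (n : Int) (x : List Int) (v : List Int) : Int :=
  let z := PySem.List.sorted2 (v.zip x) Prod.fst Prod.snd
  let xs := PySem.List.sorted x (fun a => a) false
  (PySem.List.pyRange 0 n).foldl
    (fun s i =>
      let c := (PySem.List.pyGetD z i (0, 0)).2
      s + (((PySem.List.bisectLeft xs c : Nat) : Int) + i - n + 1) * c) 0


-- ===== PORT B =====
-- the while loop 'while j > 0 and w[j-1] > b: j -= 1; suff += w[j]' of Source B, step for step;
-- j is the Nat pointer, w[j-1] is read with getD (the read happens only under 0 < j ≤ len w,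
-- where it is the Python index).
def pvAdvance (w : List Int) (b : Int) : Nat → Int → Nat × Int
  | j, suff =>
    if _h : 0 < j ∧ b < w.getD (j - 1) 0 then
      pvAdvance w b (j - 1) (suff + w.getD (j - 1) 0)
    else (j, suff)
  termination_by j => j
  decreasing_by omega

-- same z/xs/pyGetD conventions as port A; the first loop keeps the pair (w, total) as one
-- state, w.sort() is a sorted copy, 'for b in reversed(x)' folds over xs.reverse with state
-- (j, suff, total).
def calculate_minimum_distance_sum_alt (n : Int) (x : List Int) (v : List Int) : Int :=
  let z := PySem.List.sorted2 (v.zip x) Prod.fst Prod.snd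
  let xs := PySem.List.sorted x (fun a => a) false
  let s1 := (PySem.List.pyRange 0 n).foldl
    (fun st i =>
      let c := (PySem.List.pyGetD z i (0, 0)).2
      (st.1 ++ [c], st.2 + (i - n + 1) * c))
    (([] : List Int), (0 : Int))
  let w := PySem.List.sorted s1.1 (fun a => a) false
  (xs.reverse.foldl
    (fun st b =>
      let js := pvAdvance w b st.1 st.2.1
      (js.1, js.2, st.2.2 + js.2))
    (w.length, (0 : Int), s1.2)).2.2


-- ===== PRECONDITION & SPEC =====
-- Pre_ is exactly the set of inputs on which the Python A returns: A raises IndexError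
-- (z[i] with i out of range) if and only if n > min(len(x), len(v)).
def Pre_calculate_minimum_distance_sum (n : Int) (x : List Int) (v : List Int) : Prop :=
  n ≤ (x.length : Int) ∧ n ≤ (v.length : Int)
instance (n : Int) (x : List Int) (v : List Int) : Decidable (Pre_calculate_minimum_distance_sum n x v) := by unfold Pre_calculate_minimum_distance_sum; infer_instance
def pvWitness_calculate_minimum_distance_sum : Int × List Int × List Int := (2, [3, 1], [1, 2])

def Spec_calculate_minimum_distance_sum (n : Int) (x : List Int) (v : List Int) (out : Int) : Prop := out = calculate_minimum_distance_sum_alt n x v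
instance (n : Int) (x : List Int) (v : List Int) (out : Int) : Decidable (Spec_calculate_minimum_distance_sum n x v out) := by unfold Spec_calculate_minimum_distance_sum; infer_instance

-- ===== CLAIM (what is proved, stated in full; the proofs are below) =====
def Claim_equal_calculate_minimum_distance_sum : Prop := ∀ (n : Int) (x : List Int) (v : List Int), Dom_calculate_minimum_distance_sum n x v → Pre_calculate_minimum_distance_sum n x v → Spec_calculate_minimum_distance_sum n x v (calculate_minimum_distance_sum n x v)

-- ===== LEMMAS AND PROOFS =====

-- bisect_left into a sorted list is the count of strictly smaller elements
lemma pv_bisect_count (xs : List Int) (h : xs.Pairwise (· ≤ ·)) (c : Int) :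
    PySem.List.bisectLeft xs c = xs.countP (fun b => decide (b < c)) := by
  obtain ⟨hk, hlt, hge⟩ := PySem.List.bisectLeft_spec xs c h
  set k := PySem.List.bisectLeft xs c with hkdef
  have hsplit : xs.countP (fun b => decide (b < c))
      = (xs.take k).countP (fun b => decide (b < c)) + (xs.drop k).countP (fun b => decide (b < c)) := by
    rw [← List.countP_append, List.take_append_drop]
  have htake : (xs.take k).countP (fun b => decide (b < c)) = k := by
    have hlen : (xs.take k).length = k := by simp [List.length_take]; omega
    have hall : (xs.take k).countP (fun b => decide (b < c)) = (xs.take k).length := by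
      apply List.countP_eq_length.2
      intro a ha
      rw [List.mem_iff_getElem] at ha
      obtain ⟨i, hi, hia⟩ := ha
      have hik : i < k := by simpa [hlen] using hi
      have : (xs.take k)[i] = xs[i]'(by omega) := List.getElem_take
      simp only [decide_eq_true_eq]
      rw [← hia, this]
      exact hlt i (by omega) hik
    omega
  have hdrop : (xs.drop k).countP (fun b => decide (b < c)) = 0 := by
    apply List.countP_eq_zero.2
    intro a ha
    rw [List.mem_iff_getElem] at ha
    obtain ⟨i, hi, hia⟩ := ha
    have hlen : (xs.drop k).length = xs.length - k := by simp
    have : (xs.drop k)[i] = xs[k + i]'(by omega) := List.getElem_drop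
    simp only [decide_eq_true_eq, not_lt]
    rw [← hia, this]
    exact hge (k + i) (by omega) (by omega)
  omega

lemma pv_sorted_le (x : List Int) :
    (PySem.List.sorted x (fun a => a) false).Pairwise (· ≤ ·) := by
  have := PySem.List.sorted_pairwise x (fun a => a)
  simpa using this

-- in a sorted list the elements ≤ b form exactly the first countP(· ≤ b) positions
lemma pv_split (w : List Int) (hs : w.Pairwise (· ≤ ·)) (b : Int)
    (k : Nat) (hk : k < w.length) :
    w[k] ≤ b ↔ k < w.countP (fun c => decide (c ≤ b)) := by
  have hmono : ∀ (p q : Nat) (hp : p < w.length) (hq : q < w.length), p ≤ q → w[p] ≤ w[q] := by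
    intro p q hp hq hpq
    rcases Nat.eq_or_lt_of_le hpq with h | h
    · subst h; rfl
    · exact List.pairwise_iff_getElem.1 hs p q hp hq h
  set j := w.countP (fun c => decide (c ≤ b)) with hj
  constructor
  · intro hle
    have hsplit : j = (w.take (k+1)).countP (fun c => decide (c ≤ b))
        + (w.drop (k+1)).countP (fun c => decide (c ≤ b)) := by
      rw [hj, ← List.countP_append, List.take_append_drop]
    have htake : (w.take (k+1)).countP (fun c => decide (c ≤ b)) = k + 1 := by
      have hlen : (w.take (k+1)).length = k + 1 := by simp [List.length_take]; omega
      have hall : (w.take (k+1)).countP (fun c => decide (c ≤ b)) = (w.take (k+1)).length := by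
        apply List.countP_eq_length.2
        intro a ha
        rw [List.mem_iff_getElem] at ha
        obtain ⟨i, hi, hia⟩ := ha
        have hik : i < k + 1 := by simpa [hlen] using hi
        have hgeti : (w.take (k+1))[i] = w[i]'(by omega) := List.getElem_take
        simp only [decide_eq_true_eq]
        rw [← hia, hgeti]
        exact le_trans (hmono i k (by omega) hk (by omega)) hle
      omega
    omega
  · intro hkj
    by_contra hgt
    have hgt' : b < w[k] := by omega
    have hdrop : (w.drop k).countP (fun c => decide (c ≤ b)) = 0 := by
      apply List.countP_eq_zero.2
      intro a ha
      rw [List.mem_iff_getElem] at ha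
      obtain ⟨i, hi, hia⟩ := ha
      have hdl : (w.drop k).length = w.length - k := by simp
      have hgeti : (w.drop k)[i] = w[k + i]'(by omega) := List.getElem_drop
      simp only [decide_eq_true_eq, not_le]
      rw [← hia, hgeti]
      exact lt_of_lt_of_le hgt' (hmono k (k+i) hk (by omega) (by omega))
    have hsplit : j = (w.take k).countP (fun c => decide (c ≤ b))
        + (w.drop k).countP (fun c => decide (c ≤ b)) := by
      rw [hj, ← List.countP_append, List.take_append_drop]
    have htk : (w.take k).countP (fun c => decide (c ≤ b)) ≤ k := by
      calc (w.take k).countP (fun c => decide (c ≤ b)) ≤ (w.take k).length := List.countP_le_length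
        _ ≤ k := by simp [List.length_take]
    omega

lemma pv_ge_count (w : List Int) (hs : w.Pairwise (· ≤ ·)) (b : Int)
    (k : Nat) (hjk : w.countP (fun c => decide (c ≤ b)) ≤ k) (hk : k < w.length) :
    b < w[k] := by
  by_contra hle
  have := (pv_split w hs b k hk).1 (by omega)
  omega

-- the strictly-greater elements of a sorted list are exactly its suffix past countP(· ≤ b)
lemma pv_filter_eq_drop (w : List Int) (hs : w.Pairwise (· ≤ ·)) (b : Int) :
    w.filter (fun c => decide (b < c)) = w.drop (w.countP (fun c => decide (c ≤ b))) := by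
  set j := w.countP (fun c => decide (c ≤ b)) with hj
  have hjlen : j ≤ w.length := by rw [hj]; exact List.countP_le_length
  have htake : (w.take j).filter (fun c => decide (b < c)) = [] := by
    apply List.filter_eq_nil_iff.2
    intro a ha
    rw [List.mem_iff_getElem] at ha
    obtain ⟨i, hi, hia⟩ := ha
    have hil : i < j := by simp only [List.length_take] at hi; omega
    have hgeti : (w.take j)[i] = w[i]'(by omega) := List.getElem_take
    have := (pv_split w hs b i (by omega)).2 (by omega)
    simp only [decide_eq_true_eq, not_lt]
    rw [← hia, hgeti]
    omega
  have hdrop : (w.drop j).filter (fun c => decide (b < c)) = w.drop j := by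
    apply List.filter_eq_self.2
    intro a ha
    rw [List.mem_iff_getElem] at ha
    obtain ⟨i, hi, hia⟩ := ha
    have hdl : (w.drop j).length = w.length - j := by simp
    have hgeti : (w.drop j)[i] = w[j + i]'(by omega) := List.getElem_drop
    have := pv_ge_count w hs b (j + i) (by omega) (by omega)
    simp only [decide_eq_true_eq]
    rw [← hia, hgeti]
    omega
  conv_lhs => rw [← List.take_append_drop j w]
  rw [List.filter_append, htake, hdrop, List.nil_append]

-- the while loop lands on j = countP(· ≤ b) with suff = the suffix sum of elements > b
lemma pv_advance_spec (w : List Int) (hs : w.Pairwise (· ≤ ·)) (b : Int) :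
    ∀ (j : Nat) (suff : Int), j ≤ w.length → suff = (w.drop j).sum →
    (∀ k, j ≤ k → (hk : k < w.length) → b < w[k]) →
    pvAdvance w b j suff
      = (w.countP (fun c => decide (c ≤ b)), (w.filter (fun c => decide (b < c))).sum) := by
  intro j
  induction j with
  | zero =>
    intro suff _ hsuff hgt
    unfold pvAdvance
    rw [dif_neg (by omega)]
    have hcnt : w.countP (fun c => decide (c ≤ b)) = 0 := by
      apply List.countP_eq_zero.2
      intro a ha
      rw [List.mem_iff_getElem] at ha
      obtain ⟨i, hi, hia⟩ := ha
      have := hgt i (by omega) hi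
      simp only [decide_eq_true_eq, not_le]
      omega
    rw [hcnt, pv_filter_eq_drop w hs b, hcnt, hsuff]
  | succ j' ih =>
    intro suff hjlen hsuff hgt
    have hj'len : j' < w.length := by omega
    have hgetd : w.getD (j' + 1 - 1) 0 = w[j'] := List.getD_eq_getElem w 0 hj'len
    unfold pvAdvance
    by_cases hc : b < w[j']
    · rw [dif_pos (by rw [hgetd]; exact ⟨by omega, hc⟩)]
      have hdropeq : w.drop j' = w[j'] :: w.drop (j' + 1) := List.drop_eq_getElem_cons hj'len
      apply ih
      · omega
      · rw [hgetd, hdropeq, List.sum_cons, hsuff]; ring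
      · intro k hk hklen
        rcases Nat.eq_or_lt_of_le hk with h | h
        · subst h; exact hc
        · exact hgt k (by omega) hklen
    · rw [dif_neg (by rw [hgetd]; omega)]
      have h1 : j' < w.countP (fun c => decide (c ≤ b)) :=
        (pv_split w hs b j' hj'len).1 (by omega)
      have h2 : w.countP (fun c => decide (c ≤ b)) ≤ j' + 1 := by
        by_contra hc2
        have hlt : j' + 1 < w.length := by
          have := List.countP_le_length (p := fun c => decide (c ≤ b)) (l := w)
          omega
        have := (pv_split w hs b (j' + 1) hlt).2 (by omega)
        have := hgt (j' + 1) (by omega) hlt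
        omega
      have hcnt : w.countP (fun c => decide (c ≤ b)) = j' + 1 := by omega
      rw [hcnt, pv_filter_eq_drop w hs b, hcnt, hsuff]

-- the descending sweep adds, for each coordinate b, the sum of the chosen values > b
lemma pv_sweep (w : List Int) (hs : w.Pairwise (· ≤ ·)) :
    ∀ (ys : List Int), ys.Pairwise (fun a b => b ≤ a) →
    ∀ (j : Nat) (suff total : Int), j ≤ w.length → suff = (w.drop j).sum →
    (∀ b ∈ ys, ∀ k, j ≤ k → (hk : k < w.length) → b < w[k]) →
    (ys.foldl (fun st b =>
        let js := pvAdvance w b st.1 st.2.1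
        (js.1, js.2, st.2.2 + js.2)) (j, suff, total)).2.2
      = total + (ys.map (fun b => (w.filter (fun c => decide (b < c))).sum)).sum := by
  intro ys
  induction ys with
  | nil => intro _ j suff total _ _ _; simp
  | cons b ys' ih =>
    intro hpw j suff total hjlen hsuff hgt
    have hadv := pv_advance_spec w hs b j suff hjlen hsuff
      (fun k hk hklen => hgt b (List.mem_cons_self) k hk hklen)
    rw [List.foldl_cons]
    simp only [hadv]
    rw [ih (List.pairwise_cons.1 hpw).2
          (w.countP (fun c => decide (c ≤ b)))
          ((w.filter (fun c => decide (b < c))).sum)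
          (total + (w.filter (fun c => decide (b < c))).sum)
          List.countP_le_length
          (by rw [pv_filter_eq_drop w hs b])
          ?hgt']
    · rw [List.map_cons, List.sum_cons]; ring
    · intro b' hb' k hk hklen
      have h1 : b' ≤ b := (List.pairwise_cons.1 hpw).1 b' hb'
      have h2 : b < w[k] := pv_ge_count w hs b k hk hklen
      omega

-- a 0/1-weighted sum is a filtered sum
lemma pv_sum_ite (w : List Int) (b : Int) :
    (w.map (fun c => if b < c then c else 0)).sum
      = (w.filter (fun c => decide (b < c))).sum := by
  induction w with
  | nil => simp
  | cons c w' ih =>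
    rw [List.map_cons, List.sum_cons, List.filter_cons]
    by_cases h : b < c
    · rw [if_pos h, if_pos (by simpa using h), List.sum_cons, ih]
    · rw [if_neg h, if_neg (by simpa using h), ih]
      omega

-- summation-order swap: per-coordinate sums of larger chosen values = per-chosen-value
-- rank-weighted terms
lemma pv_double (X : List Int) (w : List Int) :
    (X.map (fun b => (w.filter (fun c => decide (b < c))).sum)).sum
      = (w.map (fun c => ((X.countP (fun b => decide (b < c)) : Nat) : Int) * c)).sum := by
  induction X with
  | nil => simp
  | cons a X' ih =>
    rw [List.map_cons, List.sum_cons, ih]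
    have hcongr : ∀ c ∈ w,
        ((((a :: X').countP (fun b => decide (b < c)) : Nat) : Int) * c)
          = (fun c => (if a < c then c else 0)
              + ((X'.countP (fun b => decide (b < c)) : Nat) : Int) * c) c := by
      intro c _
      rw [List.countP_cons]
      by_cases h : a < c
      · simp only [h, decide_true]
        push_cast
        ring
      · simp only [h, decide_false]
        push_cast
        ring
    rw [List.map_congr_left hcongr,
      PySem.List.sum_map_add_int w (fun c => if a < c then (c : Int) else 0)
        (fun c => ((X'.countP (fun b => decide (b < c)) : Nat) : Int) * c),
      pv_sum_ite]

lemma pv_A_eval (x v : List Int) (nn : Nat) :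
    calculate_minimum_distance_sum (nn : Int) x v
      = ((List.range nn).map (fun (i : Nat) =>
          (((PySem.List.sorted x (fun a => a) false).countP
              (fun b => decide (b < ((PySem.List.sorted2 (v.zip x) Prod.fst Prod.snd).getD i (0,0)).2)) : Int)
            + (i : Int) - (nn : Int) + 1)
          * ((PySem.List.sorted2 (v.zip x) Prod.fst Prod.snd).getD i (0,0)).2)).sum := by
  unfold calculate_minimum_distance_sum
  rw [PySem.List.pyRange_zero_natCast nn, List.foldl_map]
  simp only [PySem.List.pyGetD_natCast, pv_bisect_count _ (pv_sorted_le x)]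
  rw [PySem.List.foldl_add (g := fun i : Nat =>
      (((PySem.List.sorted x (fun a => a) false).countP
          (fun b => decide (b < ((PySem.List.sorted2 (v.zip x) Prod.fst Prod.snd).getD i (0,0)).2)) : Int)
        + (i : Int) - (nn : Int) + 1)
      * ((PySem.List.sorted2 (v.zip x) Prod.fst Prod.snd).getD i (0,0)).2)]
  rw [zero_add]

lemma pv_B_eval (x v : List Int) (nn : Nat) :
    calculate_minimum_distance_sum_alt (nn : Int) x v
      = ((List.range nn).map (fun (i : Nat) =>
            ((i : Int) - (nn : Int) + 1)
              * ((PySem.List.sorted2 (v.zip x) Prod.fst Prod.snd).getD i (0,0)).2)).sum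
        + (((PySem.List.sorted x (fun a => a) false).reverse).map
            (fun b => ((PySem.List.sorted
                ((List.range nn).map (fun (i : Nat) =>
                  ((PySem.List.sorted2 (v.zip x) Prod.fst Prod.snd).getD i (0,0)).2))
                (fun a => a) false).filter (fun c => decide (b < c))).sum)).sum := by
  unfold calculate_minimum_distance_sum_alt
  dsimp only []
  set z := PySem.List.sorted2 (v.zip x) Prod.fst Prod.snd with hz
  set xs := PySem.List.sorted x (fun a => a) false with hxs
  rw [PySem.List.pyRange_zero_natCast nn, List.foldl_map]
  simp only [PySem.List.pyGetD_natCast]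
  rw [PySem.List.foldl_prod_mk
      (f := fun l i => l ++ [(z.getD i (0,0)).2])
      (g := fun s i => s + ((i : Int) - (nn : Int) + 1) * (z.getD i (0,0)).2)]
  rw [PySem.List.foldl_append_singleton_eq_map, List.nil_append,
    PySem.List.foldl_add (g := fun i : Nat => ((i : Int) - (nn : Int) + 1) * (z.getD i (0,0)).2),
    zero_add]
  set P : List Int := (List.range nn).map (fun (i : Nat) => (z.getD i (0,0)).2) with hP
  set w := PySem.List.sorted P (fun a => a) false with hw
  rw [pv_sweep w (by rw [hw]; exact pv_sorted_le P) xs.reverse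
        (by
          rw [List.pairwise_reverse]
          exact pv_sorted_le x)
        w.length 0 _ (le_refl _) (by rw [List.drop_length, List.sum_nil])
        (by intro b _ k hk hklen; omega)]

lemma pv_trivial_A (n : Int) (x v : List Int) (h : n ≤ 0) :
    calculate_minimum_distance_sum n x v = 0 := by
  unfold calculate_minimum_distance_sum
  rw [PySem.List.pyRange_one_eq_nil h]
  rfl

lemma pv_trivial_B (n : Int) (x v : List Int) (h : n ≤ 0) :
    calculate_minimum_distance_sum_alt n x v = 0 := by
  unfold calculate_minimum_distance_sum_alt
  dsimp only []
  rw [PySem.List.pyRange_one_eq_nil h, List.foldl_nil]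
  have hnil : PySem.List.sorted ((([] : List Int), (0 : Int)).1) (fun a => a) false = [] := by
    have := PySem.List.sorted_perm ([] : List Int) (fun a => a) false
    exact List.Perm.eq_nil this
  rw [hnil]
  rw [pv_sweep ([] : List Int) (List.Pairwise.nil)
        (PySem.List.sorted x (fun a => a) false).reverse
        (by rw [List.pairwise_reverse]; exact pv_sorted_le x)
        (([] : List Int).length) 0 ((([] : List Int), (0 : Int)).2)
        (le_refl _) (by simp) (by intro b _ k _ hklen; simp at hklen)]
  simp

theorem pv_master (n : Int) (x : List Int) (v : List Int) :
    calculate_minimum_distance_sum n x v = calculate_minimum_distance_sum_alt n x v := by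
  by_cases hn : n ≤ 0
  · rw [pv_trivial_A n x v hn, pv_trivial_B n x v hn]
  · have hn' : ((n.toNat : Nat) : Int) = n := Int.toNat_of_nonneg (by omega)
    set nn := n.toNat with hnn
    rw [← hn', pv_A_eval, pv_B_eval]
    set z := PySem.List.sorted2 (v.zip x) Prod.fst Prod.snd with hz
    set xs := PySem.List.sorted x (fun a => a) false with hxs
    set P : List Int := (List.range nn).map (fun (i : Nat) => (z.getD i (0,0)).2) with hP
    set w := PySem.List.sorted P (fun a => a) false with hw
    -- sum over xs.reverse = sum over xs
    have hrev : ((xs.reverse).map (fun b => (w.filter (fun c => decide (b < c))).sum)).sum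
        = (xs.map (fun b => (w.filter (fun c => decide (b < c))).sum)).sum :=
      ((xs.reverse_perm).map (fun b => (w.filter (fun c => decide (b < c))).sum)).sum_eq
    -- summation-order swap over the full lists
    have hdd := pv_double xs w
    -- sum over w (sorted copy of P) = sum over P
    have hperm : (w.map (fun c => ((xs.countP (fun b => decide (b < c)) : Nat) : Int) * c)).sum
        = (P.map (fun c => ((xs.countP (fun b => decide (b < c)) : Nat) : Int) * c)).sum :=
      ((PySem.List.sorted_perm P (fun a => a) false).map
        (fun c => ((xs.countP (fun b => decide (b < c)) : Nat) : Int) * c)).sum_eq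
    rw [hrev, hdd, hperm, hP, List.map_map]
    have hcongr : ∀ i ∈ List.range nn,
        (((xs.countP (fun b => decide (b < (z.getD i (0,0)).2)) : Nat) : Int)
           + (i : Int) - (nn : Int) + 1) * (z.getD i (0,0)).2
        = (fun (i : Nat) => ((i : Int) - (nn : Int) + 1) * (z.getD i (0,0)).2
            + ((fun c => ((xs.countP (fun b => decide (b < c)) : Nat) : Int) * c)
                ∘ fun (i : Nat) => (z.getD i (0,0)).2) i) i := by
      intro i _
      simp only [Function.comp]
      ring
    rw [List.map_congr_left hcongr,
      PySem.List.sum_map_add_int (List.range nn)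
        (fun (i : Nat) => ((i : Int) - (nn : Int) + 1) * (z.getD i (0,0)).2)
        ((fun c => ((xs.countP (fun b => decide (b < c)) : Nat) : Int) * c)
          ∘ fun (i : Nat) => (z.getD i (0,0)).2)]

-- ===== VERDICT (by name: the statement is the Claim_ definition above) =====
theorem calculate_minimum_distance_sum_spec : Claim_equal_calculate_minimum_distance_sum := by
  intro n x v _ _
  unfold Spec_calculate_minimum_distance_sum
  exact pv_master n x v
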